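-- pv_equiv track=rewrite | github.com/yuhui7red/TsinghuaCloudGroup | TOMON/src/DeployStrategy/MinGreedy.py | MinGreedy
-- ===== SOURCE A (Python) =====
-- def MinGreedy(vmOnServer, agentNumber):
--     serverNumber = len(vmOnServer)
--     temp = [[] for i in range(serverNumber)]
--     for i in range(serverNumber):
--         temp[i].append(i+1)
--         temp[i].append(vmOnServer[i])
--     temp = sorted(temp, key=lambda d:d[1])
--     result = []
--     for i in range(agentNumber):
--         result.append(temp[i][0])
--     return result
-- ===== SOURCE B (Python) =====
-- def MinGreedy(vmOnServer, agentNumber):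
--     # Repeated-minimum greedy: no sorting; pick the least-loaded unused server
--     # agentNumber times (Python's min takes the first minimum, preserving the
--     # original-index tie-break of the stable sort in A).
--     n = len(vmOnServer)
--     used = [False] * n
--     result = []
--     for _ in range(agentNumber):
--         best = min((j for j in range(n) if not used[j]), key=lambda j: vmOnServer[j])
--         used[best] = True
--         result.append(best + 1)
--     return result
-- ===== Notes on version B (the rewrite author's own statement) =====
-- stated objective: alternative
-- what changed: Replaces A's build-pairs/sort/take-prefix with a repeated-minimum greedy over a used-flag array: agentNumber linear scans, each picking the first least-loaded unused server; no sort and no pair list.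
import Mathlib
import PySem

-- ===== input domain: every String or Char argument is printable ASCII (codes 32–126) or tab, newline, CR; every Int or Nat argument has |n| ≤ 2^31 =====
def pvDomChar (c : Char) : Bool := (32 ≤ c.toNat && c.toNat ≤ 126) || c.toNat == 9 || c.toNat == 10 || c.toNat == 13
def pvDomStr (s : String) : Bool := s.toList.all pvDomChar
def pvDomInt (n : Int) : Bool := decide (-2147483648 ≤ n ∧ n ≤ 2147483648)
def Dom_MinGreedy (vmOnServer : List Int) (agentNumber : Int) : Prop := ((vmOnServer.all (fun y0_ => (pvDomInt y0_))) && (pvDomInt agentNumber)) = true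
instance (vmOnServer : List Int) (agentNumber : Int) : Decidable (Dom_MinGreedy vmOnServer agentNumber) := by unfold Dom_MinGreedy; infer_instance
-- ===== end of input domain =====

-- B replaces A's build-pairs/sort/take-prefix by a repeated-minimum greedy over a
-- used-flag array (first minimum wins ties, matching the stable sort); equal results
-- proved on Pre_ (agentNumber ≤ len(vmOnServer); beyond it both Pythons raise).


-- ===== PORT A =====
-- temp[i] = [i+1, vmOnServer[i]] as a pair; sorted stably by the second component;
-- then 'for i in range(agentNumber): result.append(temp[i][0])' with temp[i] via
-- pyGet? (none exactly where Python raises IndexError; excluded by Pre_).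
def MinGreedy (vmOnServer : List Int) (agentNumber : Int) : List Int :=
  let temp : List (Int × Int) :=
    (PySem.List.enumerate vmOnServer 0).map (fun iv => (iv.1 + 1, iv.2))
  let temp := PySem.List.sorted temp (fun d => d.2) false
  (PySem.List.pyRange 0 agentNumber 1).foldl
    (fun result i =>
      match PySem.List.pyGet? temp i with
      | some d => result ++ [d.1]
      | none => result) []

-- ===== PORT B =====
-- one pass of Source B's loop body: min over the not-yet-used indices (Python's min
-- keeps the first minimum), mark used, append best+1; the 'none' branch (empty
-- candidates) is exactly where Source B's min raises ValueError — outside Pre_.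
def MinGreedyB_loop (vm : List Int) : Nat → List Bool → List Int → List Int
  | 0, _, result => result
  | k + 1, used, result =>
    match PySem.List.min?
        ((List.range vm.length).filter (fun j => !(used.getD j true)))
        (fun j => vm.getD j 0) with
    | none => result
    | some best => MinGreedyB_loop vm k (used.set best true) (result ++ [(best : Int) + 1])

def MinGreedy_alt (vmOnServer : List Int) (agentNumber : Int) : List Int :=
  MinGreedyB_loop vmOnServer agentNumber.toNat
    (List.replicate vmOnServer.length false) []

-- ===== PRECONDITION & SPEC =====
-- Pre_ excludes exactly agentNumber > len(vmOnServer): there A raises IndexError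
-- (temp[i] out of range) and B's min raises ValueError once all servers are used.
def Pre_MinGreedy (vmOnServer : List Int) (agentNumber : Int) : Prop :=
  agentNumber ≤ (vmOnServer.length : Int)
instance (vmOnServer : List Int) (agentNumber : Int) : Decidable (Pre_MinGreedy vmOnServer agentNumber) := by unfold Pre_MinGreedy; infer_instance

def pvWitness_MinGreedy : List Int × Int := ([3, 1, 2, 1], 3)

def Spec_MinGreedy (vmOnServer : List Int) (agentNumber : Int) (out : List Int) : Prop := out = MinGreedy_alt vmOnServer agentNumber
instance (vmOnServer : List Int) (agentNumber : Int) (out : List Int) : Decidable (Spec_MinGreedy vmOnServer agentNumber out) := by unfold Spec_MinGreedy; infer_instance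

-- ===== CLAIM (what is proved, stated in full; the proofs are below) =====
def Claim_equal_MinGreedy : Prop := ∀ (vmOnServer : List Int) (agentNumber : Int), Dom_MinGreedy vmOnServer agentNumber → Pre_MinGreedy vmOnServer agentNumber → Spec_MinGreedy vmOnServer agentNumber (MinGreedy vmOnServer agentNumber)

-- ===== LEMMAS AND PROOFS =====

def pvLex (a b : Int × Int) : Prop := a.2 < b.2 ∨ (a.2 = b.2 ∧ a.1 < b.1)

theorem pv_insertBy_pairwise (x : Int × Int) (ys : List (Int × Int))
    (hys : ys.Pairwise pvLex) (hfst : ∀ y ∈ ys, y.1 < x.1) :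
    (PySem.List.insertBy (fun a b => decide (a.2 < b.2)) x ys).Pairwise pvLex := by
  induction ys with
  | nil => simp [PySem.List.insertBy, pvLex]
  | cons y ys ih =>
    have hsnd : ∀ z ∈ ys, y.2 ≤ z.2 := by
      intro z hz
      rcases (List.pairwise_cons.mp hys).1 z hz with h | ⟨h, _⟩ <;> omega
    by_cases h : y.2 > x.2
    · simp only [PySem.List.insertBy, decide_eq_true_eq, if_pos h]
      refine List.pairwise_cons.mpr ⟨?_, hys⟩
      intro z hz
      rcases List.mem_cons.mp hz with rfl | hz
      · exact Or.inl h
      · exact Or.inl (lt_of_lt_of_le h (hsnd z hz))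
    · have h' : ¬ (x.2 < y.2) := h
      simp only [PySem.List.insertBy, decide_eq_true_eq, if_neg h']
      refine List.pairwise_cons.mpr ⟨?_, ih (List.pairwise_cons.mp hys).2
        (fun z hz => hfst z (List.mem_cons_of_mem _ hz))⟩
      intro z hz
      rcases (PySem.List.mem_insertBy _ _ _ _).mp hz with rfl | hz
      · rcases lt_or_eq_of_le (le_of_not_gt h) with h2 | h2
        · exact Or.inl h2
        · exact Or.inr ⟨h2, hfst y (List.mem_cons_self)⟩
      · exact (List.pairwise_cons.mp hys).1 z hz

def pvTemp (vm : List Int) : List (Int × Int) :=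
  (PySem.List.enumerate vm 0).map (fun iv => (iv.1 + 1, iv.2))
def pvS (vm : List Int) : List (Int × Int) :=
  PySem.List.sorted (pvTemp vm) (fun d => d.2) false

theorem pvTemp_pairwise (vm : List Int) : (pvTemp vm).Pairwise (fun a b => a.1 < b.1) := by
  have h := PySem.List.pairwise_lt_enumerate (xs := vm) (s := 0)
  exact List.Pairwise.map _ (by intro a b hab; simpa using hab) h

theorem pv_foldl_insertBy_pairwise :
    ∀ (xs acc : List (Int × Int)), acc.Pairwise pvLex →
      (∀ a ∈ acc, ∀ x ∈ xs, a.1 < x.1) → xs.Pairwise (fun a b => a.1 < b.1) →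
      (List.foldl (fun acc x => PySem.List.insertBy (fun a b => decide (a.2 < b.2)) x acc) acc xs).Pairwise pvLex := by
  intro xs
  induction xs with
  | nil => intro acc h _ _; simpa using h
  | cons x xs ih =>
    intro acc hacc hcross hxs
    simp only [List.foldl_cons]
    refine ih _ (pv_insertBy_pairwise x acc hacc (fun a ha => hcross a ha x List.mem_cons_self)) ?_ (List.pairwise_cons.mp hxs).2
    intro a ha z hz
    rcases (PySem.List.mem_insertBy _ _ _ _).mp ha with rfl | ha
    · exact (List.pairwise_cons.mp hxs).1 z hz
    · exact hcross a ha z (List.mem_cons_of_mem _ hz)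

theorem pvS_pairwise (vm : List Int) : (pvS vm).Pairwise pvLex := by
  rw [pvS, PySem.List.sorted_eq_foldl_insertBy]
  exact pv_foldl_insertBy_pairwise _ [] (by simp) (by simp) (pvTemp_pairwise vm)


theorem pv_foldA (s : List (Int × Int)) :
    ∀ (m : Nat), m ≤ s.length →
      (PySem.List.pyRange 0 (m : Int) 1).foldl
        (fun result i =>
          match PySem.List.pyGet? s i with
          | some d => result ++ [d.1]
          | none => result) []
      = (s.take m).map Prod.fst := by
  intro m
  induction m with
  | zero => simp [PySem.List.pyRange_one_eq_nil]
  | succ k ih =>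
    intro hm
    have hkl : k < s.length := hm
    have hsplit : PySem.List.pyRange 0 ((k+1 : Nat) : Int) 1
        = PySem.List.pyRange 0 (k : Nat) 1 ++ [(k : Int)] := by
      have := PySem.List.pyRange_one_succ_right (a := 0) (b := (k : Int)) (by positivity)
      simpa using this
    have hget : PySem.List.pyGet? s ((k : Nat) : Int) = some (s[k]'hkl) := by
      rw [PySem.List.pyGet?_natCast]; exact List.getElem?_eq_getElem hkl
    rw [hsplit, List.foldl_append, ih (Nat.le_of_succ_le hm)]
    simp only [List.foldl_cons, List.foldl_nil, hget]
    rw [List.map_take]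
    have hkm : k < (List.map Prod.fst s).length := by simpa using hkl
    have := List.take_concat_get (l := List.map Prod.fst s) (i := k) (h := hkm)
    simp only [List.getElem_map, List.concat_eq_append] at this
    exact this.trans (List.map_take).symm

theorem pvA_eq (vm : List Int) (m : Nat) (hm : m ≤ vm.length) :
    MinGreedy vm (m : Int) = ((pvS vm).take m).map Prod.fst := by
  have hlen : (pvS vm).length = vm.length := by
    rw [pvS, PySem.List.length_sorted, pvTemp, List.length_map, PySem.List.length_enumerate]
  exact pv_foldA (pvS vm) m (by omega)

theorem pv_min?_cons_cons {α κ : Type} [LinearOrder κ] (key : α → κ) (x y : α) (l : List α) :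
    PySem.List.min? (x :: y :: l) key
      = PySem.List.min? ((if key y < key x then y else x) :: l) key := by
  by_cases h : key y < key x <;> simp [PySem.List.min?, h]

theorem pv_min?_head_min {α κ : Type} [LinearOrder κ] (key : α → κ) (m : α) :
    ∀ (l2 : List α), (∀ y ∈ l2, key m ≤ key y) →
      PySem.List.min? (m :: l2) key = some m := by
  intro l2
  induction l2 with
  | nil => intro _; rfl
  | cons y l ih =>
    intro h
    rw [pv_min?_cons_cons, if_neg (not_lt.mpr (h y List.mem_cons_self))]
    exact ih (fun z hz => h z (List.mem_cons_of_mem _ hz))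

theorem pv_min?_first' {α κ : Type} [LinearOrder κ] (key : α → κ) :
    ∀ (l1 : List α) (a : α) (l2 : List α) (m : α), key m < key a →
      (∀ y ∈ l1, key m < key y) → (∀ y ∈ l2, key m ≤ key y) →
      PySem.List.min? (a :: (l1 ++ m :: l2)) key = some m := by
  intro l1
  induction l1 with
  | nil =>
    intro a l2 m ha _ h2
    rw [List.nil_append, pv_min?_cons_cons, if_pos ha]
    exact pv_min?_head_min key m l2 h2
  | cons b l1' ih =>
    intro a l2 m ha h1 h2
    rw [List.cons_append, pv_min?_cons_cons]
    by_cases h : key b < key a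
    · rw [if_pos h]
      exact ih b l2 m (h1 b List.mem_cons_self)
        (fun y hy => h1 y (List.mem_cons_of_mem _ hy)) h2
    · rw [if_neg h]
      exact ih a l2 m ha (fun y hy => h1 y (List.mem_cons_of_mem _ hy)) h2

theorem pv_min?_first {α κ : Type} [LinearOrder κ] (key : α → κ) (l1 l2 : List α) (m : α)
    (h1 : ∀ y ∈ l1, key m < key y) (h2 : ∀ y ∈ l2, key m ≤ key y) :
    PySem.List.min? (l1 ++ m :: l2) key = some m := by
  cases l1 with
  | nil => exact pv_min?_head_min key m l2 h2
  | cons a l1' =>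
    exact pv_min?_first' key l1' a l2 m (h1 a List.mem_cons_self)
      (fun y hy => h1 y (List.mem_cons_of_mem _ hy)) h2

def pvMask (vm : List Int) (t : Nat) : List Bool :=
  (List.range vm.length).map
    (fun (j : Nat) => decide (((j : Int) + 1) ∈ ((pvS vm).take t).map Prod.fst))

theorem pvTemp_mem (vm : List Int) (p : Int × Int) :
    p ∈ pvTemp vm ↔ ∃ (j : Nat) (h : j < vm.length), p = ((j : Int) + 1, vm[j]) := by
  simp only [pvTemp, List.mem_map, PySem.List.mem_enumerate_iff]
  constructor
  · rintro ⟨iv, ⟨k, hk, rfl⟩, rfl⟩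
    exact ⟨k, hk, by simp⟩
  · rintro ⟨j, hj, rfl⟩
    exact ⟨((j : Int), vm[j]), ⟨j, hj, by simp⟩, rfl⟩

theorem pvS_perm (vm : List Int) : (pvS vm).Perm (pvTemp vm) :=
  PySem.List.sorted_perm _ _ _

theorem pvS_length (vm : List Int) : (pvS vm).length = vm.length := by
  rw [pvS, PySem.List.length_sorted, pvTemp, List.length_map, PySem.List.length_enumerate]

theorem pvS_fst_nodup (vm : List Int) : ((pvS vm).map Prod.fst).Nodup := by
  have h1 : ((pvTemp vm).map Prod.fst).Nodup :=
    (List.Pairwise.map Prod.fst (fun a b h => h) (pvTemp_pairwise vm)).imp ne_of_lt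
  exact (((pvS_perm vm).map Prod.fst).nodup_iff).mpr h1

theorem pvMask_getD (vm : List Int) (t : Nat) (j : Nat) (hj : j < vm.length) :
    (pvMask vm t).getD j true
      = decide (((j : Int) + 1) ∈ ((pvS vm).take t).map Prod.fst) := by
  have hlen : (pvMask vm t).length = vm.length := by simp [pvMask]
  rw [List.getD_eq_getElem _ _ (by omega)]
  unfold pvMask
  rw [List.getElem_map, List.getElem_range]

theorem pvB_inv (vm : List Int) :
    ∀ (k t : Nat) (result : List Int), t + k ≤ vm.length →
      MinGreedyB_loop vm k (pvMask vm t) result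
        = result ++ (((pvS vm).drop t).take k).map Prod.fst := by
  intro k
  induction k with
  | zero => intro t result _; simp [MinGreedyB_loop]
  | succ k ih =>
    intro t result h
    have ht : t < (pvS vm).length := by rw [pvS_length]; omega
    obtain ⟨j0, hj0, hp⟩ := (pvTemp_mem vm ((pvS vm)[t]'ht)).mp
      ((pvS_perm vm).mem_iff.mp (List.getElem_mem ht))
    have hnp : ((j0 : Int) + 1) ∉ ((pvS vm).take t).map Prod.fst := by
      intro hmem
      obtain ⟨q', hq', hq1⟩ := List.mem_map.mp hmem
      obtain ⟨u, hu, hqu⟩ := List.mem_iff_getElem.mp hq'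
      have hult : u < t := by
        have := (List.length_take ..) ▸ hu; omega
      have huS : u < (pvS vm).length := by omega
      have hval : ((pvS vm).map Prod.fst)[u]'(by simpa using huS)
          = ((pvS vm).map Prod.fst)[t]'(by simpa using ht) := by
        simp only [List.getElem_map]
        rw [← List.getElem_take (h := hu)] at *
        rw [hqu, hq1, hp]
      have := (List.Nodup.getElem_inj_iff (pvS_fst_nodup vm)).mp hval
      omega
    have hfilter : (List.range vm.length).filter (fun j => !((pvMask vm t).getD j true))
        = (List.range vm.length).filter
            (fun (j : Nat) => decide (((j : Int) + 1) ∉ ((pvS vm).take t).map Prod.fst)) := by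
      apply List.filter_congr
      intro j hj
      rw [pvMask_getD vm t j (List.mem_range.mp hj)]
      simp
    have hj0c : j0 ∈ (List.range vm.length).filter
        (fun (j : Nat) => decide (((j : Int) + 1) ∉ ((pvS vm).take t).map Prod.fst)) :=
      List.mem_filter.mpr ⟨List.mem_range.mpr hj0, by simpa using hnp⟩
    have hkey : ∀ j (hj : j < vm.length),
        j ∈ (List.range vm.length).filter
          (fun (j : Nat) => decide (((j : Int) + 1) ∉ ((pvS vm).take t).map Prod.fst)) →
        vm[j0]'hj0 ≤ vm[j]'hj ∧ (vm[j]'hj = vm[j0]'hj0 → j0 ≤ j) := by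
      intro j hj hjc
      have hjnp : ((j : Int) + 1) ∉ ((pvS vm).take t).map Prod.fst := by
        have := (List.mem_filter.mp hjc).2; simpa using this
      have hqS : ((j : Int) + 1, vm[j]'hj) ∈ pvS vm :=
        (pvS_perm vm).mem_iff.mpr ((pvTemp_mem vm _).mpr ⟨j, hj, rfl⟩)
      have hsplit : ((j : Int) + 1, vm[j]'hj) ∈ (pvS vm).take t
          ∨ ((j : Int) + 1, vm[j]'hj) ∈ (pvS vm).drop t := by
        rw [← List.mem_append, List.take_append_drop]; exact hqS
      rcases hsplit with hq | hq
      · exact absurd (List.mem_map.mpr ⟨_, hq, rfl⟩) hjnp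
      · rw [List.drop_eq_getElem_cons ht] at hq
        rcases List.mem_cons.mp hq with heq | hq
        · have h1 : (j : Int) + 1 = (j0 : Int) + 1 := by
            have := congrArg Prod.fst heq; rw [hp] at this; simpa using this
          have hj0j : j = j0 := by omega
          subst hj0j
          exact ⟨le_refl _, fun _ => le_refl _⟩
        · have hlex : pvLex ((pvS vm)[t]'ht) ((j : Int) + 1, vm[j]'hj) := by
            have hPW : ((pvS vm).drop t).Pairwise pvLex := (pvS_pairwise vm).drop
            rw [List.drop_eq_getElem_cons ht] at hPW
            exact (List.pairwise_cons.mp hPW).1 _ hq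
          rw [hp] at hlex
          rcases hlex with hlt | ⟨heq, hfst⟩
          · simp only at hlt
            exact ⟨le_of_lt hlt, fun he => absurd (he ▸ hlt) (lt_irrefl _)⟩
          · simp only at heq hfst
            exact ⟨le_of_eq heq, fun _ => by omega⟩
    obtain ⟨l1, l2, hcand⟩ := List.append_of_mem hj0c
    have hpw : ((List.range vm.length).filter
        (fun (j : Nat) => decide (((j : Int) + 1) ∉ ((pvS vm).take t).map Prod.fst))).Pairwise (· < ·) :=
      List.Pairwise.filter _ (List.pairwise_lt_range)
    have hl1 : ∀ a ∈ l1, a < j0 := by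
      rw [hcand] at hpw
      intro a ha
      exact (List.pairwise_append.mp hpw).2.2 a ha j0 List.mem_cons_self
    have hmemc : ∀ j, j ∈ l1 ∨ j ∈ l2 → j < vm.length ∧
        (vm[j0]'hj0 ≤ vm.getD j 0 ∧ (vm.getD j 0 = vm[j0]'hj0 → j0 ≤ j)) := by
      intro j hj
      have hjc : j ∈ (List.range vm.length).filter
          (fun (j : Nat) => decide (((j : Int) + 1) ∉ ((pvS vm).take t).map Prod.fst)) := by
        rw [hcand]
        rcases hj with hj | hj
        · exact List.mem_append_left _ hj
        · exact List.mem_append_right _ (List.mem_cons_of_mem _ hj)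
      have hjn : j < vm.length := List.mem_range.mp (List.mem_filter.mp hjc).1
      have := hkey j hjn hjc
      rw [List.getD_eq_getElem _ _ hjn]
      exact ⟨hjn, this⟩
    have hgd0 : vm.getD j0 0 = vm[j0]'hj0 := List.getD_eq_getElem _ _ hj0
    have hmin : PySem.List.min?
        ((List.range vm.length).filter (fun j => !((pvMask vm t).getD j true)))
        (fun j => vm.getD j 0) = some j0 := by
      rw [hfilter, hcand]
      apply pv_min?_first
      · intro y hy
        obtain ⟨_, hle, himp⟩ := hmemc y (Or.inl hy)
        rw [hgd0]
        rcases lt_or_eq_of_le hle with hlt | heq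
        · exact hlt
        · exact absurd (himp heq.symm) (by have := hl1 y hy; omega)
      · intro y hy
        obtain ⟨_, hle, _⟩ := hmemc y (Or.inr hy)
        rw [hgd0]
        exact hle
    have hset : (pvMask vm t).set j0 true = pvMask vm (t + 1) := by
      apply List.ext_getElem (by simp [pvMask])
      intro u h1 h2
      have hun : u < vm.length := by simpa [pvMask] using h2
      rw [List.getElem_set]
      have htake : (pvS vm).take (t + 1) = (pvS vm).take t ++ [(pvS vm)[t]'ht] := by
        rw [List.take_add_one, List.getElem?_eq_getElem ht]; rfl
      unfold pvMask
      simp only [List.getElem_map, List.getElem_range, htake, List.map_append]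
      by_cases hu : u = j0
      · subst hu
        simp [hp]
      · have : ((u : Int) + 1 = (j0 : Int) + 1) ↔ False := by
          constructor
          · intro hh; exact hu (by omega)
          · exact False.elim
        simp [hp, List.mem_append, this]
        exact fun hq => absurd hq.symm hu
    have hdrop : (pvS vm).drop t = ((pvS vm)[t]'ht) :: (pvS vm).drop (t + 1) :=
      List.drop_eq_getElem_cons ht
    show MinGreedyB_loop vm (k + 1) (pvMask vm t) result = _
    simp only [MinGreedyB_loop, hmin, hset,
      ih (t + 1) (result ++ [(j0 : Int) + 1]) (by omega), hdrop]
    simp [hp]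

theorem pvB_eq (vm : List Int) (a : Int) (ha : a ≤ (vm.length : Int)) :
    MinGreedy_alt vm a = ((pvS vm).take a.toNat).map Prod.fst := by
  have hmask0 : List.replicate vm.length false = pvMask vm 0 := by
    simp [pvMask]
  unfold MinGreedy_alt
  rw [hmask0, pvB_inv vm a.toNat 0 [] (by omega)]
  simp

-- ===== VERDICT (by name: the statement is the Claim_ definition above) =====
theorem MinGreedy_spec : Claim_equal_MinGreedy := by
  intro vm a _ hpre
  unfold Pre_MinGreedy at hpre
  unfold Spec_MinGreedy
  rw [pvB_eq vm a hpre]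
  by_cases h : 0 ≤ a
  · rw [show a = ((a.toNat : Nat) : Int) from (Int.toNat_of_nonneg h).symm]
    exact pvA_eq vm a.toNat (by omega)
  · have ha0 : a.toNat = 0 := by omega
    rw [ha0]
    show (PySem.List.pyRange 0 a 1).foldl _ [] = _
    rw [PySem.List.pyRange_one_eq_nil (by omega)]
    simp
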